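-- pv_equiv track=rewrite | github.com/techno-optimist/observatory | backend/research/legibility_analyzer.py | _detect_mode_shifts
-- ===== SOURCE A (Python) =====
-- from typing import Dict, List, Optional, Tuple, Any
--
-- def _detect_mode_shifts(
--
--     mode_history: List[str],
-- ) -> List[Tuple[int, str, str]]:
--     """Detect mode classification shifts in history."""
--     shifts = []
--
--     for i in range(1, len(mode_history)):
--         if mode_history[i] != mode_history[i - 1]:
--             shifts.append((i, mode_history[i - 1], mode_history[i]))
--
--     return shifts
-- ===== SOURCE B (Python) =====
-- from itertools import groupby
-- from typing import List, Tuple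
--
--
-- def _detect_mode_shifts(
--     mode_history: List[str],
-- ) -> List[Tuple[int, str, str]]:
--     """Collapse the history into consecutive runs and report each run boundary."""
--     shifts = []
--     idx = 0
--     prev = ""
--     for key, grp in groupby(mode_history):
--         if idx > 0:
--             shifts.append((idx, prev, key))
--         idx += len(list(grp))
--         prev = key
--     return shifts
-- ===== Notes on version B (the rewrite author's own statement) =====
-- stated objective: alternative
-- what changed: B collapses the history into consecutive runs with itertools.groupby and emits one shift per run boundary using a cumulative index, instead of A's per-index comparison of each element with its predecessor.
import Mathlib
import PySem

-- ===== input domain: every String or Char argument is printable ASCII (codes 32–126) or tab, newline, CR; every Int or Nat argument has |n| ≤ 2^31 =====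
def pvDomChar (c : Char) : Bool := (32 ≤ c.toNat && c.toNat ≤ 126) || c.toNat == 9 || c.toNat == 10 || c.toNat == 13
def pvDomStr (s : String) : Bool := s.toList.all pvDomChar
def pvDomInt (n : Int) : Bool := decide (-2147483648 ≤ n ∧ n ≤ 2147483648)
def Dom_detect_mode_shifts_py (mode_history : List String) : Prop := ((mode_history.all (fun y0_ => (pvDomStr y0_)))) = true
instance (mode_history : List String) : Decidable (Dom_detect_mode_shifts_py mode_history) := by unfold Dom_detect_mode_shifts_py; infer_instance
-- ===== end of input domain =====

-- B replaces A's per-index adjacent comparison by an itertools.groupby run-collapse with a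
-- cumulative index (alternative decomposition; same O(n) cost).

-- ===== PORT A =====
-- for i in range(1, len(mode_history)): if xs[i] != xs[i-1]: shifts.append((i, xs[i-1], xs[i]))
def detect_mode_shifts_py (mode_history : List String) : List (Int × String × String) :=
  (PySem.List.pyRange 1 (mode_history.length : Int) 1).foldl
    (fun shifts i =>
      if PySem.List.pyGetD mode_history i "" ≠ PySem.List.pyGetD mode_history (i - 1) "" then
        shifts ++ [(i, PySem.List.pyGetD mode_history (i - 1) "", PySem.List.pyGetD mode_history i "")]
      else shifts)
    []

-- ===== PORT B =====
-- hand port of itertools.groupby specialised to the identity key: consecutive runs of equal strings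
def pyGroupby (xs : List String) : List (String × List String) :=
  match xs with
  | [] => []
  | x :: rest =>
      (x, x :: rest.takeWhile (· == x)) :: pyGroupby (rest.dropWhile (· == x))
termination_by xs.length
decreasing_by
  simp only [List.length_cons]
  exact Nat.lt_succ_of_le (List.length_dropWhile_le _ _)

-- for key, grp in groupby(...): if idx > 0: shifts.append((idx, prev, key)); idx += len(list(grp)); prev = key
def detect_mode_shifts_py_alt (mode_history : List String) : List (Int × String × String) :=
  ((pyGroupby mode_history).foldl
    (fun (st : Int × String × List (Int × String × String)) kg =>
      let idx := st.1
      let prev := st.2.1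
      let shifts := st.2.2
      let shifts' := if idx > 0 then shifts ++ [(idx, prev, kg.1)] else shifts
      (idx + (kg.2.length : Int), kg.1, shifts'))
    (0, "", [])).2.2

-- ===== PRECONDITION & SPEC =====
def Spec_detect_mode_shifts_py (mode_history : List String) (out : List (Int × String × String)) : Prop := out = detect_mode_shifts_py_alt mode_history
instance (mode_history : List String) (out : List (Int × String × String)) : Decidable (Spec_detect_mode_shifts_py mode_history out) := by unfold Spec_detect_mode_shifts_py; infer_instance

-- ===== CLAIM (what is proved, stated in full; the proofs are below) =====
def Claim_equal_detect_mode_shifts_py : Prop := ∀ (mode_history : List String), Dom_detect_mode_shifts_py mode_history → Spec_detect_mode_shifts_py mode_history (detect_mode_shifts_py mode_history)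

-- ===== LEMMAS AND PROOFS =====

-- reference function: scan the tail with the previous element and a running index
def pvPairs (i : Int) (prev : String) : List String → List (Int × String × String)
  | [] => []
  | x :: rest => (if x ≠ prev then [(i, prev, x)] else []) ++ pvPairs (i + 1) x rest

theorem pvPairs_run (g : List String) (x : String) (hg : ∀ y ∈ g, y = x) :
    ∀ (r : List String) (i : Int), pvPairs i x (g ++ r) = pvPairs (i + g.length) x r := by
  induction g with
  | nil => intro r i; simp
  | cons y t ih =>
      intro r i
      have hy : y = x := hg y (by simp)
      have ht : ∀ y ∈ t, y = x := fun z hz => hg z (by simp [hz])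
      subst hy
      simp only [List.cons_append, pvPairs, ne_eq, not_true_eq_false]
      rw [ih ht r (i + 1)]
      have harg : i + 1 + (t.length : Int) = i + ((t.length + 1 : Nat) : Int) := by
        push_cast; ring
      rw [harg]
      simp

-- A's index loop equals the reference scan, from position k+1 on
theorem pvA_loop (xs : List String) :
    ∀ (m k : Nat) (acc : List (Int × String × String)), xs.length = k + 1 + m →
    (PySem.List.pyRange ((k : Int) + 1) (xs.length : Int) 1).foldl
      (fun shifts i =>
        if PySem.List.pyGetD xs i "" ≠ PySem.List.pyGetD xs (i - 1) "" then
          shifts ++ [(i, PySem.List.pyGetD xs (i - 1) "", PySem.List.pyGetD xs i "")]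
        else shifts) acc
    = acc ++ pvPairs ((k : Int) + 1) (xs.getD k "") (xs.drop (k + 1)) := by
  intro m
  induction m with
  | zero =>
      intro k acc hl
      have hnil : PySem.List.pyRange ((k : Int) + 1) (xs.length : Int) 1 = [] := by
        apply PySem.List.pyRange_one_eq_nil
        omega
      have hdrop : xs.drop (k + 1) = [] := by
        apply List.drop_of_length_le
        omega
      rw [hnil, hdrop]
      simp [pvPairs]
  | succ m ih =>
      intro k acc hl
      have hk1 : k + 1 < xs.length := by omega
      have hlt : ((k : Int) + 1) < (xs.length : Int) := by exact_mod_cast Nat.lt_of_lt_of_le hk1 (le_refl _)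
      rw [PySem.List.pyRange_one_cons hlt]
      simp only [List.foldl_cons]
      have e1 : PySem.List.pyGetD xs ((k : Int) + 1) "" = xs[k + 1] := by
        rw [show ((k : Int) + 1) = ((k + 1 : Nat) : Int) by push_cast; ring,
          PySem.List.pyGetD_natCast]
        exact List.getD_eq_getElem xs "" hk1
      have e0 : PySem.List.pyGetD xs ((k : Int) + 1 - 1) "" = xs.getD k "" := by
        rw [show ((k : Int) + 1 - 1) = ((k : Nat) : Int) by ring, PySem.List.pyGetD_natCast]
      rw [e1, e0]
      rw [show ((k : Int) + 1 + 1) = (((k + 1 : Nat)) : Int) + 1 by push_cast; ring]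
      rw [ih (k + 1) _ (by omega)]
      rw [List.drop_eq_getElem_cons hk1]
      simp only [pvPairs]
      rw [List.getD_eq_getElem xs "" hk1]
      rw [show (((k + 1 : Nat)) : Int) + 1 = (k : Int) + 1 + 1 by push_cast; ring]
      split_ifs with h
      · simp [List.append_assoc]
      · simp

-- B's run fold equals the reference scan, once the index is positive and prev differs from the head
theorem pvB_loop :
    ∀ (n : Nat) (l : List String), l.length ≤ n →
    ∀ (idx : Int) (prev : String) (acc : List (Int × String × String)),
    0 < idx → (∀ h : l ≠ [], l.head h ≠ prev) →
    ((pyGroupby l).foldl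
      (fun (st : Int × String × List (Int × String × String)) kg =>
        let idx := st.1
        let prev := st.2.1
        let shifts := st.2.2
        let shifts' := if idx > 0 then shifts ++ [(idx, prev, kg.1)] else shifts
        (idx + (kg.2.length : Int), kg.1, shifts'))
      (idx, prev, acc)).2.2
    = acc ++ pvPairs idx prev l := by
  intro n
  induction n with
  | zero =>
      intro l hn idx prev acc _ _
      have : l = [] := List.eq_nil_of_length_eq_zero (by omega)
      subst this
      simp [pyGroupby, pvPairs]
  | succ n ih =>
      intro l hn idx prev acc hidx hhead
      match l with
      | [] => simp [pyGroupby, pvPairs]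
      | x :: rest =>
        have hx : x ≠ prev := hhead (by simp)
        rw [pyGroupby]
        simp only [List.foldl_cons, if_pos hidx, List.length_cons]
        rw [ih (rest.dropWhile (· == x))
          (by have := List.length_dropWhile_le (· == x) rest; simp at hn ⊢; omega)
          (idx + ((rest.takeWhile (· == x)).length + 1 : Nat)) x
          (acc ++ [(idx, prev, x)])
          (by omega)
          (by
            intro h
            have hb := List.head_dropWhile_not (· == x) h
            simp only [beq_eq_false_iff_ne, ne_eq] at hb
            exact hb)]
        simp only [pvPairs, ne_eq, hx, not_false_eq_true, ite_true]
        have hsplit : pvPairs (idx + 1) x rest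
            = pvPairs (idx + 1 + ((rest.takeWhile (· == x)).length : Int)) x
                (rest.dropWhile (· == x)) := by
          conv_lhs => rw [← List.takeWhile_append_dropWhile (p := (· == x)) (l := rest)]
          exact pvPairs_run _ x
            (fun y hy => eq_of_beq (List.mem_takeWhile_imp (p := (· == x)) hy)) _ _
        rw [hsplit]
        rw [show idx + (((rest.takeWhile (· == x)).length + 1 : Nat) : Int)
            = idx + 1 + ((rest.takeWhile (· == x)).length : Int) by push_cast; ring]
        simp [List.append_assoc]

theorem detect_mode_shifts_py_spec : Claim_equal_detect_mode_shifts_py := by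
  unfold Claim_equal_detect_mode_shifts_py
  intro xs _
  unfold Spec_detect_mode_shifts_py detect_mode_shifts_py detect_mode_shifts_py_alt
  match xs with
  | [] =>
    rw [show ((([] : List String)).length : Int) = 0 by simp,
      PySem.List.pyRange_one_eq_nil (by norm_num)]
    simp [pyGroupby]
  | x :: rest =>
    have hA := pvA_loop (x :: rest) rest.length 0 []
      (by simp only [List.length_cons]; omega)
    rw [show ((0 : Nat) : Int) + 1 = 1 by norm_num] at hA
    simp only [List.getD_cons_zero, List.drop_succ_cons, List.drop_zero] at hA
    rw [hA]
    rw [pyGroupby]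
    simp only [List.foldl_cons, List.length_cons]
    simp only [gt_iff_lt, lt_self_iff_false, if_false]
    rw [pvB_loop (rest.dropWhile (· == x)).length (rest.dropWhile (· == x)) (le_refl _)
      _ x []
      (by omega)
      (by
        intro h
        have hb := List.head_dropWhile_not (· == x) h
        simp only [beq_eq_false_iff_ne, ne_eq] at hb
        exact hb)]
    have hsplit : pvPairs 1 x rest
        = pvPairs (1 + ((rest.takeWhile (· == x)).length : Int)) x
            (rest.dropWhile (· == x)) := by
      conv_lhs => rw [← List.takeWhile_append_dropWhile (p := (· == x)) (l := rest)]
      exact pvPairs_run _ x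
        (fun y hy => eq_of_beq (List.mem_takeWhile_imp (p := (· == x)) hy)) _ _
    rw [hsplit]
    rw [show ((((rest.takeWhile (· == x)).length + 1 : Nat)) : Int)
        = 1 + ((rest.takeWhile (· == x)).length : Int) by push_cast; ring]
    simp
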